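-- pv_equiv track=rewrite | github.com/krimeano/aoc-2023 | days/day05/solution.py | find_stalk
-- ===== SOURCE A (Python) =====
-- MapItem = tuple[int, int, int]
--
-- def find_stalk(leaf: int, tree: list[MapItem or None]) -> MapItem or None:
--     ix = 0
--
--     while ix < len(tree):
--         stalk = tree[ix]
--
--         if not stalk:
--             return None
--
--         if stalk[1] <= leaf < stalk[1] + stalk[2]:
--             return stalk
--
--         ix = 2 * ix + (leaf < stalk[1] and 1 or 2)
--
--     return None
-- ===== SOURCE B (Python) =====
-- def find_stalk(leaf, tree):
--     # Materialise the implicit array-encoded BST as an explicit binary tree once,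
--     # then search it by structural recursion.
--     def build(ix):
--         if ix >= len(tree):
--             return None  # absent subtree
--         return (tree[ix], build(2 * ix + 1), build(2 * ix + 2))
--
--     def search(node):
--         if node is None:
--             return None
--         stalk, left, right = node
--         if not stalk:
--             return None
--         if stalk[1] <= leaf < stalk[1] + stalk[2]:
--             return stalk
--         return search(left) if leaf < stalk[1] else search(right)
--
--     return search(build(0))
-- ===== Notes on version B (the rewrite author's own statement) =====
-- stated objective: alternative
-- what changed: B first builds the implicit array BST into an explicit binary-tree structure and then searches that tree by structural recursion, replacing A's index-arithmetic while-loop over the flat list.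
import Mathlib
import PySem

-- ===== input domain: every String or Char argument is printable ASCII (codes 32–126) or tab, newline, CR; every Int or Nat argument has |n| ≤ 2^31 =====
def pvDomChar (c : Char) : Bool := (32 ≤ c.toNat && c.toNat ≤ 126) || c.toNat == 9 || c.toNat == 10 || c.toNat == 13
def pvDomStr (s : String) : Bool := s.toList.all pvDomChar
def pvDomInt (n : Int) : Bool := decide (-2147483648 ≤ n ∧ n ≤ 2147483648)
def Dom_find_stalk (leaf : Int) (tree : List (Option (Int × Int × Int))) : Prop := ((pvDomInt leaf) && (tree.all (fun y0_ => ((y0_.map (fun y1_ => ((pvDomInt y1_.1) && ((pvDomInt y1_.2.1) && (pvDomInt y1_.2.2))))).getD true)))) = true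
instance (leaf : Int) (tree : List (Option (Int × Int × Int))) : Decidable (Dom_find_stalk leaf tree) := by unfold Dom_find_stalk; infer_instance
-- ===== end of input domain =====

-- B materialises the implicit array BST as an explicit binary tree and searches it by
-- structural recursion, instead of A's index-arithmetic while-loop (objective: alternative).


-- ===== PORT A =====
-- the while loop of A, recursing on the growing index ix (ix < len so tree[ix] is in range)
def findStalkLoopA (leaf : Int) (tree : List (Option (Int × Int × Int))) (ix : Nat) :
    Option (Int × Int × Int) :=
  if h : ix < tree.length then
    match tree[ix] with
    | none => none
    | some stalk =>
      if stalk.2.1 ≤ leaf ∧ leaf < stalk.2.1 + stalk.2.2 then some stalk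
      else findStalkLoopA leaf tree (2 * ix + (if leaf < stalk.2.1 then 1 else 2))
  else none
termination_by tree.length - ix
decreasing_by all_goals (split_ifs <;> omega)

def find_stalk (leaf : Int) (tree : List (Option (Int × Int × Int))) : Option (Int × Int × Int) :=
  findStalkLoopA leaf tree 0

-- ===== PORT B =====
inductive FSTree where
  | nil : FSTree
  | node : Option (Int × Int × Int) → FSTree → FSTree → FSTree

-- Source B's build(ix): materialise the implicit array BST as an explicit tree
def fsBuild (tree : List (Option (Int × Int × Int))) (ix : Nat) : FSTree :=
  if h : ix < tree.length then
    .node tree[ix] (fsBuild tree (2 * ix + 1)) (fsBuild tree (2 * ix + 2))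
  else .nil
termination_by tree.length - ix
decreasing_by all_goals omega

-- Source B's search(node): structural recursion on the explicit tree
def fsSearch (leaf : Int) : FSTree → Option (Int × Int × Int)
  | .nil => none
  | .node none _ _ => none
  | .node (some stalk) l r =>
    if stalk.2.1 ≤ leaf ∧ leaf < stalk.2.1 + stalk.2.2 then some stalk
    else if leaf < stalk.2.1 then fsSearch leaf l else fsSearch leaf r

def find_stalk_alt (leaf : Int) (tree : List (Option (Int × Int × Int))) : Option (Int × Int × Int) :=
  fsSearch leaf (fsBuild tree 0)

-- ===== PRECONDITION & SPEC =====
def Spec_find_stalk (leaf : Int) (tree : List (Option (Int × Int × Int))) (out : Option (Int × Int × Int)) : Prop := out = find_stalk_alt leaf tree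
instance (leaf : Int) (tree : List (Option (Int × Int × Int))) (out : Option (Int × Int × Int)) : Decidable (Spec_find_stalk leaf tree out) := by unfold Spec_find_stalk; infer_instance

-- ===== CLAIM (what is proved, stated in full; the proofs are below) =====
def Claim_equal_find_stalk : Prop := ∀ (leaf : Int) (tree : List (Option (Int × Int × Int))), Dom_find_stalk leaf tree → Spec_find_stalk leaf tree (find_stalk leaf tree)

-- ===== LEMMAS AND PROOFS =====
theorem fsSearch_build_eq_loop (leaf : Int) (tree : List (Option (Int × Int × Int))) :
    ∀ (n ix : Nat), tree.length - ix ≤ n →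
      fsSearch leaf (fsBuild tree ix) = findStalkLoopA leaf tree ix := by
  intro n
  induction n with
  | zero =>
    intro ix h
    have hx : ¬ ix < tree.length := by omega
    rw [fsBuild, findStalkLoopA, dif_neg hx, dif_neg hx]
    rfl
  | succ n ih =>
    intro ix h
    by_cases hx : ix < tree.length
    · rw [fsBuild, findStalkLoopA, dif_pos hx, dif_pos hx]
      cases hg : tree[ix] with
      | none => rfl
      | some stalk =>
        rw [fsSearch]
        by_cases hin : stalk.2.1 ≤ leaf ∧ leaf < stalk.2.1 + stalk.2.2
        · simp [hin]
        · simp only [if_neg hin]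
          by_cases hlt : leaf < stalk.2.1
          · simp only [if_pos hlt]
            exact ih (2 * ix + 1) (by omega)
          · simp only [if_neg hlt]
            exact ih (2 * ix + 2) (by omega)
    · rw [fsBuild, findStalkLoopA, dif_neg hx, dif_neg hx]
      rfl

-- ===== VERDICT (by name: the statement is the Claim_ definition above) =====
theorem find_stalk_spec : Claim_equal_find_stalk := by
  intro leaf tree _
  unfold Spec_find_stalk find_stalk find_stalk_alt
  exact (fsSearch_build_eq_loop leaf tree tree.length 0 (by omega)).symm
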